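-- pv_equiv track=rewrite | github.com/Wheels-Heaman/CubeSolver | webcamFive.py | createRects
-- ===== SOURCE A (Python) =====
-- def createRects(CubeSize, CubieSize, TopLeft, Padding):
-- 	rects = []
-- 	sampleRects = []
-- 	stickerNo = 0
-- 	for x in range(CubeSize):
-- 		for y in range(CubeSize):
-- 			differenceX = x * CubieSize
-- 			differenceY = y * CubieSize
-- 			rects.append([(TopLeft[0] + differenceX, TopLeft[1] + differenceY), (TopLeft[0] + (differenceX + CubieSize), TopLeft[1] + (differenceY + CubieSize))])
-- 			sampleRects.append([(rects[stickerNo][0][0] + Padding, rects[stickerNo][0][1] + Padding), (rects[stickerNo][1][0] - Padding, rects[stickerNo][1][1]- Padding)])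
-- 			stickerNo += 1
--
-- 	return rects, sampleRects
-- ===== SOURCE B (Python) =====
-- def createRects(CubeSize, CubieSize, TopLeft, Padding):
--     # Template-and-translate: build one base cell rectangle, translate it to form
--     # a column, translate the column to form the grid, then shrink each rect.
--     def shift(rect, dx, dy):
--         return [(px + dx, py + dy) for (px, py) in rect]
--
--     base = [(TopLeft[0], TopLeft[1]), (TopLeft[0] + CubieSize, TopLeft[1] + CubieSize)]
--     column = [shift(base, 0, y * CubieSize) for y in range(CubeSize)]
--     rects = [shift(r, x * CubieSize, 0) for x in range(CubeSize) for r in column]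
--     sampleRects = [shift([r[0]], Padding, Padding) + shift([r[1]], -Padding, -Padding)
--                    for r in rects]
--     return rects, sampleRects
-- ===== Notes on version B (the rewrite author's own statement) =====
-- stated objective: alternative
-- what changed: A computes every rectangle's coordinates from the (x,y) indices inside one fused loop with a stickerNo counter indexing back into the growing rects list; B builds one template cell rectangle, forms a column by translating it, forms the grid by translating the column, and derives sampleRects by shifting each finished rect's corners.
import Mathlib
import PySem

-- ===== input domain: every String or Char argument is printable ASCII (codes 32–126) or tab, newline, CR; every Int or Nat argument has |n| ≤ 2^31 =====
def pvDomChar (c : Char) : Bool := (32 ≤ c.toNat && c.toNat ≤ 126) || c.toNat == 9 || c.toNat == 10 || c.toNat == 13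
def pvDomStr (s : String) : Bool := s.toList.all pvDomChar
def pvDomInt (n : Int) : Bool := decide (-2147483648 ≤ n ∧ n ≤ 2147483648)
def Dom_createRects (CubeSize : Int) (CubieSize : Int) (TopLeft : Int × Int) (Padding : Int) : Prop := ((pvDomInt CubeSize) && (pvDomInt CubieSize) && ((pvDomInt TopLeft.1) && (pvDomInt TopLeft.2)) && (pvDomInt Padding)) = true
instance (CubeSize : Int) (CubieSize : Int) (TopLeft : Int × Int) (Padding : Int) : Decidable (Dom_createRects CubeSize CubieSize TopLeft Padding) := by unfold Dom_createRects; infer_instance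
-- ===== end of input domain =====

-- B replaces A's fused index-arithmetic loop (append + stickerNo self-indexing) with a
-- template-and-translate construction: one base cell rect, translated into a column, then a grid,
-- then corner-shifted into sampleRects (objective: alternative).

-- ===== PORT A =====
-- inner loop body of A: state is (rects, sampleRects, stickerNo)
def createRectsStep (CubieSize : Int) (TopLeft : Int × Int) (Padding : Int) (x : Int)
    (st : List (List (Int × Int)) × List (List (Int × Int)) × Int) (y : Int) :
    List (List (Int × Int)) × List (List (Int × Int)) × Int :=
  let rects := st.1
  let sampleRects := st.2.1
  let stickerNo := st.2.2
  let differenceX := x * CubieSize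
  let differenceY := y * CubieSize
  let rects' := rects ++ [[(TopLeft.1 + differenceX, TopLeft.2 + differenceY),
                           (TopLeft.1 + (differenceX + CubieSize), TopLeft.2 + (differenceY + CubieSize))]]
  -- rects[stickerNo][0] / rects[stickerNo][1]: the index is always in range in A, so .getD never supplies its default
  let r := (PySem.List.pyGet? rects' stickerNo).getD []
  let r0 := (PySem.List.pyGet? r 0).getD (0, 0)
  let r1 := (PySem.List.pyGet? r 1).getD (0, 0)
  let sampleRects' := sampleRects ++ [[(r0.1 + Padding, r0.2 + Padding), (r1.1 - Padding, r1.2 - Padding)]]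
  (rects', sampleRects', stickerNo + 1)

def createRects (CubeSize : Int) (CubieSize : Int) (TopLeft : Int × Int) (Padding : Int) : (List (List (Int × Int))) × (List (List (Int × Int))) :=
  let st := (PySem.List.pyRange 0 CubeSize 1).foldl
    (fun st x => (PySem.List.pyRange 0 CubeSize 1).foldl (createRectsStep CubieSize TopLeft Padding x) st)
    ([], [], 0)
  (st.1, st.2.1)

-- ===== PORT B =====
-- Source B's shift helper: translate every corner of a rect by (dx, dy)
def pvShift (rect : List (Int × Int)) (dx dy : Int) : List (Int × Int) :=
  rect.map (fun p => (p.1 + dx, p.2 + dy))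

def createRects_alt (CubeSize : Int) (CubieSize : Int) (TopLeft : Int × Int) (Padding : Int) : (List (List (Int × Int))) × (List (List (Int × Int))) :=
  let base := [(TopLeft.1, TopLeft.2), (TopLeft.1 + CubieSize, TopLeft.2 + CubieSize)]
  let column := (PySem.List.pyRange 0 CubeSize 1).map (fun y => pvShift base 0 (y * CubieSize))
  let rects := (PySem.List.pyRange 0 CubeSize 1).flatMap (fun x => column.map (fun r => pvShift r (x * CubieSize) 0))
  -- r[0] / r[1]: every rect built above has exactly two corners, so .getD never supplies its default
  let sampleRects := rects.map (fun r =>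
    pvShift [(PySem.List.pyGet? r 0).getD (0, 0)] Padding Padding ++
    pvShift [(PySem.List.pyGet? r 1).getD (0, 0)] (-Padding) (-Padding))
  (rects, sampleRects)

-- ===== PRECONDITION & SPEC =====
def Spec_createRects (CubeSize : Int) (CubieSize : Int) (TopLeft : Int × Int) (Padding : Int) (out : (List (List (Int × Int))) × (List (List (Int × Int)))) : Prop := out = createRects_alt CubeSize CubieSize TopLeft Padding
instance (CubeSize : Int) (CubieSize : Int) (TopLeft : Int × Int) (Padding : Int) (out : (List (List (Int × Int))) × (List (List (Int × Int)))) : Decidable (Spec_createRects CubeSize CubieSize TopLeft Padding out) := by unfold Spec_createRects; infer_instance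

-- ===== CLAIM (what is proved, stated in full; the proofs are below) =====
def Claim_equal_createRects : Prop := ∀ (CubeSize : Int) (CubieSize : Int) (TopLeft : Int × Int) (Padding : Int), Dom_createRects CubeSize CubieSize TopLeft Padding → Spec_createRects CubeSize CubieSize TopLeft Padding (createRects CubeSize CubieSize TopLeft Padding)

-- ===== LEMMAS AND PROOFS =====

-- the rectangle A builds for cell (x, y)
def pvRectA (CubieSize : Int) (TopLeft : Int × Int) (x y : Int) : List (Int × Int) :=
  [(TopLeft.1 + x * CubieSize, TopLeft.2 + y * CubieSize),
   (TopLeft.1 + (x * CubieSize + CubieSize), TopLeft.2 + (y * CubieSize + CubieSize))]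

-- the sample rect A builds from that rect
def pvSampleA (CubieSize : Int) (TopLeft : Int × Int) (Padding x y : Int) : List (Int × Int) :=
  [(TopLeft.1 + x * CubieSize + Padding, TopLeft.2 + y * CubieSize + Padding),
   (TopLeft.1 + (x * CubieSize + CubieSize) - Padding, TopLeft.2 + (y * CubieSize + CubieSize) - Padding)]

theorem createRectsStep_eq (c : Int) (t : Int × Int) (p x y : Int)
    (rects samples : List (List (Int × Int))) :
    createRectsStep c t p x (rects, samples, (rects.length : Int)) y =
      (rects ++ [pvRectA c t x y], samples ++ [pvSampleA c t p x y],
       ((rects.length : Int) + 1)) := by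
  simp [createRectsStep, pvRectA, pvSampleA]

theorem inner_fold (c : Int) (t : Int × Int) (p x : Int) (ys : List Int)
    (rects samples : List (List (Int × Int))) :
    ys.foldl (createRectsStep c t p x) (rects, samples, (rects.length : Int)) =
      (rects ++ ys.map (pvRectA c t x),
       samples ++ ys.map (pvSampleA c t p x),
       ((rects ++ ys.map (pvRectA c t x)).length : Int)) := by
  induction ys generalizing rects samples with
  | nil => simp
  | cons y ys ih =>
    simp only [List.foldl_cons, createRectsStep_eq]
    rw [show ((rects.length : Int) + 1) = (((rects ++ [pvRectA c t x y]).length : Int)) by simp]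
    rw [ih]
    simp

theorem outer_fold (c : Int) (t : Int × Int) (p : Int) (ys xs : List Int)
    (rects samples : List (List (Int × Int))) :
    xs.foldl (fun st x => ys.foldl (createRectsStep c t p x) st)
        (rects, samples, (rects.length : Int)) =
      (rects ++ xs.flatMap (fun x => ys.map (pvRectA c t x)),
       samples ++ xs.flatMap (fun x => ys.map (pvSampleA c t p x)),
       ((rects ++ xs.flatMap (fun x => ys.map (pvRectA c t x))).length : Int)) := by
  induction xs generalizing rects samples with
  | nil => simp
  | cons a xs ih =>
    simp only [List.foldl_cons, inner_fold, ih]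
    simp

-- B's grid rect for (x, y) is A's rect
theorem rect_eq (c : Int) (t : Int × Int) (x y : Int) :
    pvShift (pvShift [(t.1, t.2), (t.1 + c, t.2 + c)] 0 (y * c)) (x * c) 0 =
      pvRectA c t x y := by
  simp [pvShift, pvRectA]; omega

-- B's shrink of A's rect is A's sample rect
theorem sample_eq (c : Int) (t : Int × Int) (p x y : Int) :
    (pvShift [(PySem.List.pyGet? (pvRectA c t x y) 0).getD (0, 0)] p p ++
     pvShift [(PySem.List.pyGet? (pvRectA c t x y) 1).getD (0, 0)] (-p) (-p)) =
      pvSampleA c t p x y := by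
  simp [pvShift, pvRectA, pvSampleA, PySem.List.pyGet?, PySem.List.pyIdx?]
  omega

-- ===== VERDICT (by name: the statement is the Claim_ definition above) =====
theorem createRects_spec : Claim_equal_createRects := by
  intro CubeSize CubieSize TopLeft Padding _
  unfold Spec_createRects createRects createRects_alt
  have h := outer_fold CubieSize TopLeft Padding
    (PySem.List.pyRange 0 CubeSize 1) (PySem.List.pyRange 0 CubeSize 1) [] []
  simp only [List.length_nil, Int.natCast_zero] at h
  rw [h]
  simp only [List.nil_append]
  have hB : (fun x => List.map (fun r => pvShift r (x * CubieSize) 0)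
        (List.map (fun y => pvShift [(TopLeft.1, TopLeft.2),
            (TopLeft.1 + CubieSize, TopLeft.2 + CubieSize)] 0 (y * CubieSize))
          (PySem.List.pyRange 0 CubeSize 1))) =
      (fun x => List.map (pvRectA CubieSize TopLeft x) (PySem.List.pyRange 0 CubeSize 1)) := by
    funext x
    rw [List.map_map]
    apply List.map_congr_left
    intro y _
    exact rect_eq CubieSize TopLeft x y
  rw [hB]
  refine Prod.ext rfl ?_
  simp only [List.map_flatMap, List.map_map]
  apply List.flatMap_congr
  intro x _
  apply List.map_congr_left
  intro y _
  simp only [Function.comp]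
  exact sample_eq CubieSize TopLeft Padding x y
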